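-- pv_equiv track=rewrite | github.com/baibenyu/PY-Algorithm-Learning | venv/竞赛/蓝桥杯真题/2013/13.带分数.py | check
-- ===== SOURCE A (Python) =====
-- def check(x, no_used):
--     s = str(x)
--     cf = set()
--     for each in s:
--         if each in cf or each not in no_used:  # 自身无重复且未使用已使用的数字
--             return 0
--         cf.add(each)
--     return 1
-- ===== SOURCE B (Python) =====
-- def check(x, no_used):
--     s = sorted(str(x))
--     if any(a == b for a, b in zip(s, s[1:])):
--         return 0
--     if any(ch not in no_used for ch in s):
--         return 0
--     return 1
-- ===== Notes on version B (the rewrite author's own statement) =====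
-- stated objective: alternative
-- what changed: Instead of a single early-exit scan threading a running 'seen' set, B sorts the digit characters and detects duplicates by comparing adjacent elements of the sorted list, then checks availability in a separate pass; no set is used at all.
import Mathlib
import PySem

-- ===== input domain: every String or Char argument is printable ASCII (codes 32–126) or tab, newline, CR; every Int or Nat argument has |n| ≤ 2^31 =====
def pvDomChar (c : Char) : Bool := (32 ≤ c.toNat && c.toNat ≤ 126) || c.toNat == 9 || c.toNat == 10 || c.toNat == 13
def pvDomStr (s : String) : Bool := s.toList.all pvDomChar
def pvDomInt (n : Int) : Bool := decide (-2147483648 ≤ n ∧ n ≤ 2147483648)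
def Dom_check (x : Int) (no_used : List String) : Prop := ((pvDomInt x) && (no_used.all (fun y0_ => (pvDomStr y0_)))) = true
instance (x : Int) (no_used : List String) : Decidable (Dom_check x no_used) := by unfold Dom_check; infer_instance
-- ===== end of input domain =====

-- B sorts the digit characters and finds duplicates by adjacent comparison (no set); return value only, no side effects.

-- ===== PORT A =====
-- the 'for each in s' loop with the running set cf and early 'return 0'
def checkLoop (no_used : List String) : List Char → PySem.Set String → Int
  | [], _ => 1
  | c :: rest, cf =>
    let each := String.ofList [c]
    if PySem.Set.contains cf each || !(no_used.contains each) then 0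
    else checkLoop no_used rest (PySem.Set.add cf each)

def check (x : Int) (no_used : List String) : Int :=
  checkLoop no_used (PySem.Int.toStr x).toList PySem.Set.empty

-- ===== PORT B =====
def check_alt (x : Int) (no_used : List String) : Int :=
  -- s = sorted(str(x)) : Python sorts the characters by code point
  let s := PySem.List.sorted (PySem.Int.toStr x).toList (fun c => c) false
  -- any(a == b for a, b in zip(s, s[1:])): s[1:] is the tail (drop 1)
  if (s.zip (s.drop 1)).any (fun p => p.1 == p.2) then 0
  -- any(ch not in no_used for ch in s): Python iterates chars as 1-char strings
  else if s.any (fun c => !(no_used.contains (String.ofList [c]))) then 0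
  else 1

-- ===== PRECONDITION & SPEC =====
def Spec_check (x : Int) (no_used : List String) (out : Int) : Prop := out = check_alt x no_used
instance (x : Int) (no_used : List String) (out : Int) : Decidable (Spec_check x no_used out) := by unfold Spec_check; infer_instance

-- ===== CLAIM =====
def Claim_equal_check : Prop := ∀ (x : Int) (no_used : List String), Dom_check x no_used → Spec_check x no_used (check x no_used)

-- ===== LEMMAS AND PROOFS =====

-- A's loop returns 1 exactly when the chars are pairwise distinct, avoid cf, and all lie (as 1-char strings) in no_used
theorem checkLoop_eq (no_used : List String) (l : List Char) (cf : PySem.Set String) :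
    checkLoop no_used l cf =
      if l.Nodup ∧ (∀ c ∈ l, String.ofList [c] ∉ cf) ∧ (∀ c ∈ l, String.ofList [c] ∈ no_used)
      then 1 else 0 := by
  induction l generalizing cf with
  | nil => simp [checkLoop]
  | cons c rest ih =>
    simp only [checkLoop, ih]
    by_cases hcf : String.ofList [c] ∈ cf
    · rw [if_pos (show _ = true by simp [hcf]), if_neg]
      rintro ⟨-, h2, -⟩; exact h2 c (by simp) hcf
    · by_cases hnu : String.ofList [c] ∈ no_used
      · rw [if_neg (show ¬ _ = true by simp [hcf, hnu])]
        congr 1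
        simp only [List.nodup_cons, List.mem_cons, PySem.Set.mem_add, eq_iff_iff, not_or]
        constructor
        · rintro ⟨h1, h2, h3⟩
          refine ⟨⟨fun hc' => (h2 c hc').2 rfl, h1⟩, ?_, ?_⟩
          · rintro c' (rfl | hc')
            · exact hcf
            · exact (h2 c' hc').1
          · rintro c' (rfl | hc')
            · exact hnu
            · exact h3 c' hc'
        · rintro ⟨⟨h0, h1⟩, h2, h3⟩
          refine ⟨h1, fun c' hc' => ⟨h2 c' (Or.inr hc'), fun he => ?_⟩,
            fun c' hc' => h3 c' (Or.inr hc')⟩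
          have : c' = c := by
            have := congrArg String.toList he; simpa using this
          exact h0 (this ▸ hc')
      · rw [if_pos (show _ = true by simp [hnu]), if_neg]
        rintro ⟨-, -, h3⟩; exact hnu (h3 c (by simp))

-- on a ≤-sorted list, no adjacent pair equal ↔ no duplicates at all
theorem adj_nodup (s : List Char) (hpw : s.Pairwise (· ≤ ·)) :
    ((s.zip (s.drop 1)).any (fun p => p.1 == p.2) = false) ↔ s.Nodup := by
  induction s with
  | nil => simp
  | cons a t ih =>
    cases t with
    | nil => simp
    | cons b t' =>
      obtain ⟨hab, hpw'⟩ := List.pairwise_cons.mp hpw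
      have ih' := ih hpw'
      simp only [List.drop_one, List.tail_cons, List.zip_cons_cons, List.any_cons,
        Bool.or_eq_false_iff, beq_eq_false_iff_ne, ne_eq, List.nodup_cons] at ih' ⊢
      constructor
      · rintro ⟨hne, hrest⟩
        have hlt : a < b := lt_of_le_of_ne (hab b (by simp)) hne
        refine ⟨?_, (ih'.1 hrest)⟩
        simp only [List.mem_cons, not_or]
        refine ⟨hne, fun hmem => ?_⟩
        have : b ≤ a := (List.pairwise_cons.mp hpw').1 a hmem
        exact absurd (lt_of_lt_of_le hlt this) (lt_irrefl a)
      · rintro ⟨hnm, hnd⟩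
        simp only [List.mem_cons, not_or] at hnm
        exact ⟨hnm.1, ih'.2 hnd⟩

-- ===== VERDICT =====
theorem check_spec : Claim_equal_check := by
  intro x no_used _
  unfold Spec_check check check_alt
  rw [checkLoop_eq]
  set l := (PySem.Int.toStr x).toList with hl
  set s := PySem.List.sorted l (fun c => c) false with hs
  have hperm : s.Perm l := PySem.List.sorted_perm ..
  have hpw : s.Pairwise (· ≤ ·) := PySem.List.sorted_pairwise ..
  have hadj := adj_nodup s hpw
  by_cases h1 : ((s.zip (s.drop 1)).any fun p => p.1 == p.2) = true
  · -- an adjacent duplicate exists → l has duplicates → A returns 0 too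
    rw [if_pos h1, if_neg]
    rintro ⟨hnd, -, -⟩
    rw [hadj.mpr (hperm.nodup_iff.mpr hnd)] at h1
    exact Bool.false_ne_true h1
  · rw [if_neg h1]
    have h1' : ((s.zip (s.drop 1)).any fun p => p.1 == p.2) = false :=
      Bool.eq_false_iff.mpr h1
    have hnd : l.Nodup := hperm.nodup_iff.mp (hadj.mp h1')
    by_cases h2 : (s.any fun c => !(no_used.contains (String.ofList [c]))) = true
    · rw [if_pos h2, if_neg]
      rintro ⟨-, -, h3⟩
      obtain ⟨c, hc, hbad⟩ := List.any_eq_true.mp h2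
      have hmem : String.ofList [c] ∈ no_used := h3 c (hperm.mem_iff.mp hc)
      simp [List.contains_eq_mem, hmem] at hbad
    · rw [if_neg h2, if_pos]
      refine ⟨hnd, fun c _ => by simp [PySem.Set.empty], fun c hc => ?_⟩
      by_contra hnm
      apply h2
      refine List.any_eq_true.mpr ⟨c, hperm.mem_iff.mpr hc, ?_⟩
      simp [List.contains_eq_mem, hnm]
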